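-- pv_equiv track=rewrite | github.com/DragunWF/Competitive-Programming | CodeWars/python/6_kyu/80s_kids_4.py | mark_spot
-- ===== SOURCE A (Python) =====
-- def mark_spot(n: int) -> str:
--     if not type(n) is int or n % 2 == 0 or n < 0:
--         return "?"
--     if n == 1:
--         return "X\n"
--     edge_whitespace_count = 0
--     middle_whitespace_count = n * 2 - 3
--     output = []
--     for i in range(n):
--         edges = " " * edge_whitespace_count
--         middle = " " * middle_whitespace_count
--         output.append(f"{edges}X{middle}X" if i != n // 2 else f"{edges}X")
--         if i < n // 2:
--             edge_whitespace_count += 2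
--             middle_whitespace_count = max(middle_whitespace_count - 4, -1)
--         else:
--             edge_whitespace_count -= 2
--             middle_whitespace_count += 4
--     return "\n".join(output) + "\n"
-- ===== SOURCE B (Python) =====
-- def mark_spot(n: int) -> str:
--     # closed-form X positions per row; no running counters, no n==1 special case
--     if not type(n) is int or n % 2 == 0 or n < 0:
--         return "?"
--     rows = []
--     for i in range(n):
--         d = min(i, n - 1 - i)
--         left = 2 * d
--         right = 2 * (n - 1) - 2 * d
--         if left == right:
--             rows.append(" " * left + "X")
--         else:
--             rows.append(" " * left + "X" + " " * (right - left - 1) + "X")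
--     return "\n".join(rows) + "\n"
-- ===== Notes on version B (the rewrite author's own statement) =====
-- stated objective: simpler
-- what changed: A maintains two running whitespace counters updated with branches and a max-clamp across the loop, plus a special case for the single-row pattern; B computes each row independently from the closed-form X column positions d=min(i,n-1-i) giving columns 2d and 2(n-1)-2d, needing no carried state and no special case beyond the guard.
import Mathlib
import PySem

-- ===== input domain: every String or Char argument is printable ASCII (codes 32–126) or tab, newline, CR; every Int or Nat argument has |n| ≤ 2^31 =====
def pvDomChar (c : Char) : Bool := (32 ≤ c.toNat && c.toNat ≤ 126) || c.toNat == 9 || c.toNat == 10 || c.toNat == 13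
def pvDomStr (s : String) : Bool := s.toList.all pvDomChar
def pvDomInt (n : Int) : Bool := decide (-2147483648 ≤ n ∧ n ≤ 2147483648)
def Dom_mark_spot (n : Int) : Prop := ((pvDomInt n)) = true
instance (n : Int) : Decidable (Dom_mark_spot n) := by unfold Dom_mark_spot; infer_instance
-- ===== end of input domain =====

-- B replaces A's three running counters (edge/middle whitespace, updated with branches and a max-clamp)
-- by a closed-form computation of the two X columns per row; objective: simpler.

-- ===== PORT A =====
-- A's loop body: state = (edge_whitespace_count, middle_whitespace_count, output)
def stepA (n : Int) (st : Int × Int × List String) (i : Int) : Int × Int × List String :=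
  let edges := String.ofList (PySem.List.pyRepeat [' '] st.1)
  let middle := String.ofList (PySem.List.pyRepeat [' '] st.2.1)
  let row := if i ≠ PySem.Int.floordiv n 2 then edges ++ "X" ++ middle ++ "X" else edges ++ "X"
  if i < PySem.Int.floordiv n 2 then (st.1 + 2, max (st.2.1 - 4) (-1), st.2.2 ++ [row])
  else (st.1 - 2, st.2.1 + 4, st.2.2 ++ [row])

def mark_spot (n : Int) : String :=
  if PySem.Int.mod n 2 = 0 ∨ n < 0 then "?"
  else if n = 1 then "X\n"
  else
    let st := (PySem.List.pyRange 0 n 1).foldl (stepA n) (0, n * 2 - 3, [])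
    PySem.Str.join "\n" st.2.2 ++ "\n"

-- ===== PORT B =====
-- closed-form row: d = min(i, n-1-i); marks at columns 2d and 2(n-1)-2d
def markRow (n i : Int) : String :=
  let d := min i (n - 1 - i)
  let left := 2 * d
  let right := 2 * (n - 1) - 2 * d
  if left = right then String.ofList (PySem.List.pyRepeat [' '] left ++ ['X'])
  else String.ofList (PySem.List.pyRepeat [' '] left ++ ['X'] ++ PySem.List.pyRepeat [' '] (right - left - 1) ++ ['X'])

def mark_spot_alt (n : Int) : String :=
  if PySem.Int.mod n 2 = 0 ∨ n < 0 then "?"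
  else PySem.Str.join "\n" ((PySem.List.pyRange 0 n 1).map (markRow n)) ++ "\n"

-- ===== PRECONDITION & SPEC =====
def Spec_mark_spot (n : Int) (out : String) : Prop := out = mark_spot_alt n
instance (n : Int) (out : String) : Decidable (Spec_mark_spot n out) := by unfold Spec_mark_spot; infer_instance

-- ===== CLAIM (what is proved, stated in full; the proofs are below) =====
def Claim_equal_mark_spot : Prop := ∀ (n : Int), Dom_mark_spot n → Spec_mark_spot n (mark_spot n)

-- ===== LEMMAS AND PROOFS =====

-- A's counters at the start of row i (n = 2*c+1, c = n // 2)
def pvE (c i : Int) : Int := if i ≤ c then 2 * i else 2 * (2 * c - i)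
def pvM (c i : Int) : Int := if i ≤ c then max (2 * (2 * c + 1) - 3 - 4 * i) (-1) else 4 * i - 2 * (2 * c + 1) + 1

theorem row_eq (c k : Int) (hc : 1 ≤ c) (hk0 : 0 ≤ k) (hk : k ≤ 2 * c) :
    (if k ≠ PySem.Int.floordiv (2 * c + 1) 2 then
        String.ofList (PySem.List.pyRepeat [' '] (pvE c k)) ++ "X" ++
          String.ofList (PySem.List.pyRepeat [' '] (pvM c k)) ++ "X"
      else String.ofList (PySem.List.pyRepeat [' '] (pvE c k)) ++ "X")
      = markRow (2 * c + 1) k := by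
  have hfd : PySem.Int.floordiv (2 * c + 1) 2 = c := by
    rw [PySem.Int.floordiv_eq_iff_of_pos (by omega)]; omega
  rw [hfd]
  simp only [markRow, PySem.List.pyRepeat_singleton]
  have hE : (pvE c k).toNat = (2 * min k (2 * c + 1 - 1 - k)).toNat := by
    unfold pvE; split_ifs <;> omega
  by_cases h : k = c
  · rw [if_neg (by omega : ¬ k ≠ c), if_pos (by omega : 2 * min k (2 * c + 1 - 1 - k) = 2 * (2 * c + 1 - 1) - 2 * min k (2 * c + 1 - 1 - k))]
    rw [show ("X" : String) = String.ofList ['X'] from rfl, String.ofList_append, hE]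
  · have hM : (pvM c k).toNat = (2 * (2 * c + 1 - 1) - 2 * min k (2 * c + 1 - 1 - k) - 2 * min k (2 * c + 1 - 1 - k) - 1).toNat := by
      unfold pvM; split_ifs <;> omega
    rw [if_pos (by omega : k ≠ c), if_neg (by omega : ¬ 2 * min k (2 * c + 1 - 1 - k) = 2 * (2 * c + 1 - 1) - 2 * min k (2 * c + 1 - 1 - k))]
    rw [show ("X" : String) = String.ofList ['X'] from rfl]
    simp only [String.ofList_append]
    rw [hE, hM]

theorem loop_eq (n c : Int) (hn : n = 2 * c + 1) (hc : 1 ≤ c)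
    (k : Nat) (hk : (k : Int) ≤ n) :
    (PySem.List.pyRange 0 (k : Int) 1).foldl (stepA n) (0, n * 2 - 3, [])
      = (pvE c k, pvM c k, (PySem.List.pyRange 0 (k : Int) 1).map (markRow n)) := by
  induction k with
  | zero =>
    rw [show ((0 : Nat) : Int) = 0 by rfl, PySem.List.pyRange_one_eq_nil (le_refl 0)]
    simp only [List.foldl_nil, List.map_nil]
    unfold pvE pvM
    refine Prod.ext ?_ (Prod.ext ?_ rfl) <;> simp <;> omega
  | succ m ih =>
    have hm : (m : Int) < n := by push_cast at hk ⊢; omega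
    rw [show ((m + 1 : Nat) : Int) = (m : Int) + 1 by push_cast; ring]
    rw [PySem.List.pyRange_one_succ_right (by positivity)]
    rw [List.foldl_append, List.map_append, ih (by omega)]
    simp only [List.foldl_cons, List.foldl_nil, List.map_cons, List.map_nil]
    have hrow := row_eq c m hc (by positivity) (by omega)
    rw [hn] at *
    have hfd : PySem.Int.floordiv (2 * c + 1) 2 = c := by
      rw [PySem.Int.floordiv_eq_iff_of_pos (by omega)]; omega
    rw [hfd] at hrow
    simp only [stepA, hfd]
    by_cases h : (m : Int) < c
    · rw [if_pos h]
      refine Prod.ext ?_ (Prod.ext ?_ ?_)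
      · show pvE c m + 2 = pvE c ((m : Int) + 1)
        unfold pvE; split_ifs <;> omega
      · show max (pvM c m - 4) (-1) = pvM c ((m : Int) + 1)
        unfold pvM; split_ifs <;> omega
      · show _ ++ [_] = _ ++ [markRow (2 * c + 1) (m : Int)]
        rw [hrow]
    · rw [if_neg h]
      refine Prod.ext ?_ (Prod.ext ?_ ?_)
      · show pvE c m - 2 = pvE c ((m : Int) + 1)
        unfold pvE; split_ifs <;> omega
      · show pvM c m + 4 = pvM c ((m : Int) + 1)
        unfold pvM; split_ifs <;> omega
      · show _ ++ [_] = _ ++ [markRow (2 * c + 1) (m : Int)]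
        rw [hrow]

-- ===== VERDICT (by name: the statement is the Claim_ definition above) =====
theorem mark_spot_spec : Claim_equal_mark_spot := by
  intro n _
  unfold Spec_mark_spot mark_spot mark_spot_alt
  by_cases hg : PySem.Int.mod n 2 = 0 ∨ n < 0
  · rw [if_pos hg, if_pos hg]
  · rw [if_neg hg, if_neg hg]
    have hodd : PySem.Int.mod n 2 ≠ 0 := fun h => hg (Or.inl h)
    have hnn : ¬ n < 0 := fun h => hg (Or.inr h)
    have hdm := PySem.Int.floordiv_mul_add_mod n 2
    have hm0 := PySem.Int.mod_nonneg n (b := 2) (by omega)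
    have hm2 := PySem.Int.mod_lt n (b := 2) (by omega)
    have hm1 : PySem.Int.mod n 2 = 1 := by omega
    set c := PySem.Int.floordiv n 2 with hcdef
    have hn : n = 2 * c + 1 := by omega
    by_cases h1 : n = 1
    · subst h1; decide
    · rw [if_neg h1]
      have hc : 1 ≤ c := by omega
      have hk : ((n.toNat : Int)) = n := by omega
      rw [← hk]
      rw [loop_eq (↑n.toNat) c (by omega) hc n.toNat (le_refl _)]
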